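-- pv_equiv track=rewrite | github.com/Palpatraz02/ISITILPassistant | ISITILPassistant.py | extra_space_remover
-- ===== SOURCE A (Python) =====
-- def extra_space_remover(stringa):
--     temp = ""
--     space = False
--     for x in stringa:
--         if x == " " and space == True:
--             continue
--         elif x == " " and space == False:
--             space = True
--         else:
--             space = False
--         temp = temp + x
--     if stringa[0] == " ":
--         temp = temp[1:]
--     if stringa[-1] == " ":
--         temp = temp[:-1]
--     return temp.lower()
-- ===== SOURCE B (Python) =====
-- def extra_space_remover(stringa):
--     # tokenize on literal spaces, drop the empty pieces, rejoin with single spaces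
--     tokens = [t for t in stringa.split(" ") if t != ""]
--     return " ".join(tokens).lower()
-- ===== Notes on version B (the rewrite author's own statement) =====
-- stated objective: faster
-- what changed: Replaces the character-by-character flag-carrying loop with repeated string concatenation plus two conditional edge slices by a staged tokenize/filter/join pipeline: split on literal spaces, drop empty tokens, rejoin with single spaces, lowercase.
-- crash fix: On the empty string A raises IndexError at stringa[0]; B returns the empty string. — e.g. on extra_space_remover(""): A raises IndexError, B returns ""
import Mathlib
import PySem

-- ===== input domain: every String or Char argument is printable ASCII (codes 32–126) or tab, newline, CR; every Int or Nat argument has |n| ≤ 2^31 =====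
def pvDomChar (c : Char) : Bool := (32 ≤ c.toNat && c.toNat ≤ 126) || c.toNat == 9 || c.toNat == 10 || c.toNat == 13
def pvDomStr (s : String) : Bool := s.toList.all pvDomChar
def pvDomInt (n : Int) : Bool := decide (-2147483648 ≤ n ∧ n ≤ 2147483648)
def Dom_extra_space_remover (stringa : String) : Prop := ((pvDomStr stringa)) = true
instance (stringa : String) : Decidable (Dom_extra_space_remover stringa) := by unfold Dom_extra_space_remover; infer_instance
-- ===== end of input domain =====

-- B replaces the flag-carrying loop (repeated concatenation) + edge slices by a tokenize/filter/join pipeline (split on ' ', drop empties, rejoin); measured faster in a timing run.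

-- ===== PORT A =====
-- the for-loop: state (temp, space), temp = temp + x
def aLoop : List Char → List Char → Bool → List Char
  | [], temp, _ => temp
  | x :: rest, temp, space =>
    if x = ' ' ∧ space = true then aLoop rest temp space
    else if x = ' ' ∧ space = false then aLoop rest (temp ++ [x]) true
    else aLoop rest (temp ++ [x]) false

def extra_space_remover (stringa : String) : String :=
  let l := stringa.toList
  let temp := aLoop l [] false
  -- stringa[0] / stringa[-1]: pyGet? is none exactly where Python raises IndexError (the empty string, excluded by Pre_)
  let temp1 := if PySem.List.pyGet? l 0 = some ' ' then PySem.List.slice temp (some 1) none else temp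
  let temp2 := if PySem.List.pyGet? l (-1) = some ' ' then PySem.List.slice temp1 none (some (-1)) else temp1
  String.ofList (PySem.Chars.lower temp2)

-- ===== PORT B =====
-- tokens = [t for t in stringa.split(" ") if t != ""]; return " ".join(tokens).lower()
def extra_space_remover_alt (stringa : String) : String :=
  let tokens := (PySem.Chars.splitOn stringa.toList [' ']).filter (fun t => !(t == []))
  String.ofList (PySem.Chars.lower (PySem.Chars.join [' '] tokens))

-- ===== PRECONDITION & SPEC =====
-- Pre_ excludes only the empty string, on which A raises IndexError at stringa[0]
def Pre_extra_space_remover (stringa : String) : Prop := stringa ≠ ""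
instance (stringa : String) : Decidable (Pre_extra_space_remover stringa) := by unfold Pre_extra_space_remover; infer_instance
def pvWitness_extra_space_remover : String := " a  B "

-- On the empty string A raises IndexError (stringa[0]); B returns "".
def Raises_extra_space_remover (stringa : String) : Prop := stringa = ""
instance (stringa : String) : Decidable (Raises_extra_space_remover stringa) := by unfold Raises_extra_space_remover; infer_instance
def pvRaiseWitness_extra_space_remover : String := ""
def pvRaiseWitnessOut_extra_space_remover : String := ""

def Spec_extra_space_remover (stringa : String) (out : String) : Prop := out = extra_space_remover_alt stringa
instance (stringa : String) (out : String) : Decidable (Spec_extra_space_remover stringa out) := by unfold Spec_extra_space_remover; infer_instance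

-- ===== CLAIM (what is proved, stated in full; the proofs are below) =====
def Claim_equal_extra_space_remover : Prop := ∀ (stringa : String), Dom_extra_space_remover stringa → Pre_extra_space_remover stringa → Spec_extra_space_remover stringa (extra_space_remover stringa)
def Claim_raises_extra_space_remover : Prop := (∀ (stringa : String), Dom_extra_space_remover stringa → Raises_extra_space_remover stringa → ¬ Pre_extra_space_remover stringa) ∧ (Dom_extra_space_remover (pvRaiseWitness_extra_space_remover) ∧ Raises_extra_space_remover (pvRaiseWitness_extra_space_remover) ∧ extra_space_remover_alt (pvRaiseWitness_extra_space_remover) = pvRaiseWitnessOut_extra_space_remover)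

-- ===== LEMMAS AND PROOFS =====

-- the canonical normal form both sides are reduced to: specT (fresh) / specI (inside a token)
mutual
def specT : List Char → List Char
  | [] => []
  | c :: r => if c = ' ' then specT r else c :: specI r
def specI : List Char → List Char
  | [] => []
  | c :: r => if c = ' ' then (if specT r = [] then [] else ' ' :: specT r) else c :: specI r
end

-- ---------- A side: the loop collapses runs; decompose the result as lead ++ specT ++ trail ----------
def core : Bool → List Char → List Char
  | _, [] => []
  | sp, c :: r => if c = ' ' ∧ sp = true then core true r else c :: core (c == ' ') r

def leadL (l : List Char) : List Char := if l.head? = some ' ' then [' '] else []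
def tbL (l : List Char) : List Char := if l.getLast? = some ' ' then [' '] else []
def trailL (l : List Char) : List Char := if specT l = [] then [] else tbL l

theorem aLoop_eq (l : List Char) : ∀ (temp : List Char) (sp : Bool),
    aLoop l temp sp = temp ++ core sp l := by
  induction l with
  | nil => intro temp sp; simp [aLoop, core]
  | cons c r ih =>
    intro temp sp
    by_cases hc : c = ' '
    · cases sp <;> simp [aLoop, core, hc, ih]
    · have hcb : (c == ' ') = false := by simp [hc]
      simp [aLoop, core, hc, hcb, ih]

theorem specT_nil_all_space (r : List Char) : specT r = [] → ∀ x ∈ r, x = ' ' := by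
  induction r with
  | nil => simp
  | cons c t ih =>
    intro h x hx
    by_cases hc : c = ' '
    · rw [specT, if_pos hc] at h
      rcases List.mem_cons.mp hx with hx | hx
      · exact hx ▸ hc
      · exact ih h x hx
    · rw [specT, if_neg hc] at h; exact absurd h (by simp)

theorem getLast?_all_space (r : List Char) (hne : r ≠ []) (h : ∀ x ∈ r, x = ' ') :
    r.getLast? = some ' ' := by
  rw [List.getLast?_eq_some_getLast hne]
  exact congrArg some (h _ (List.getLast_mem hne))

-- N: the "inside a token" form vs the decomposition
theorem specI_decomp (r : List Char) : specI r ++ tbL r = leadL r ++ specT r ++ trailL r := by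
  induction r with
  | nil => simp [specI, specT, tbL, leadL, trailL]
  | cons c t ih =>
    by_cases hc : c = ' '
    · subst hc
      by_cases ht : specT t = []
      · -- all of t is spaces
        have htb : tbL (' ' :: t) = [' '] := by
          cases t with
          | nil => simp [tbL]
          | cons d u =>
            have := getLast?_all_space (d :: u) (by simp) (specT_nil_all_space _ ht)
            simp [tbL, List.getLast?_cons_cons] at this ⊢
            simpa [List.getLast?_cons_cons] using this
        simp [specI, specT, trailL, leadL, ht, htb]
      · have htne : t ≠ [] := by rintro rfl; exact ht rfl
        have htb : tbL (' ' :: t) = tbL t := by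
          cases t with
          | nil => exact absurd rfl htne
          | cons d u => simp [tbL, List.getLast?_cons_cons]
        simp [specI, specT, trailL, leadL, ht, htb]
    · have htb : tbL (c :: t) = if t = [] then [] else tbL t := by
        cases t with
        | nil => simp [tbL, hc]
        | cons d u => simp [tbL, List.getLast?_cons_cons]
      have hsne : specT (c :: t) ≠ [] := by rw [specT, if_neg hc]; simp
      cases t with
      | nil => simp [specI, specT, trailL, leadL, hc, htb]
      | cons d u =>
        have : trailL (c :: d :: u) = tbL (d :: u) := by
          simp [trailL, hsne, tbL, List.getLast?_cons_cons]
        simp [specI, specT, leadL, hc, htb, this]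

theorem core_false_eq_lead_core_true (l : List Char) :
    core false l = leadL l ++ core true l := by
  cases l with
  | nil => simp [core, leadL]
  | cons c r =>
    by_cases hc : c = ' '
    · subst hc
      simp [core, leadL]
    · simp [core, leadL, hc]

theorem core_true_eq (l : List Char) : core true l = specT l ++ trailL l := by
  induction l with
  | nil => simp [core, specT, trailL]
  | cons c r ih =>
    by_cases hc : c = ' '
    · subst hc
      have h1 : core true (' ' :: r) = core true r := by simp [core]
      have h2 : specT (' ' :: r) = specT r := by rw [specT, if_pos rfl]
      have h3 : trailL (' ' :: r) = trailL r := by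
        by_cases ht : specT r = []
        · simp [trailL, h2, ht]
        · have htne : r ≠ [] := by rintro rfl; exact ht rfl
          have : tbL (' ' :: r) = tbL r := by
            cases r with
            | nil => exact absurd rfl htne
            | cons d u => simp [tbL, List.getLast?_cons_cons]
          simp [trailL, h2, ht, this]
      rw [h1, ih, h2, h3]
    · have h1 : core true (c :: r) = c :: core false r := by
        have : (c == ' ') = false := by simp [hc]
        simp [core, hc, this]
      have hsne : specT (c :: r) ≠ [] := by rw [specT, if_neg hc]; simp
      have h2 : specT (c :: r) = c :: specI r := by rw [specT, if_neg hc]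
      have h3 : trailL (c :: r) = if r = [] then [] else tbL r := by
        cases r with
        | nil => simp [trailL, hsne, tbL, hc]
        | cons d u => simp [trailL, hsne, tbL, List.getLast?_cons_cons]
      rw [h1, core_false_eq_lead_core_true, ih, h2, h3]
      cases r with
      | nil => simp [specI, specT, trailL, leadL]
      | cons d u =>
        have := specI_decomp (d :: u)
        simp only [List.cons_append]
        rw [if_neg (by simp), ← List.append_assoc, ← this]

theorem core_decomp (l : List Char) : core false l = leadL l ++ specT l ++ trailL l := by
  rw [core_false_eq_lead_core_true, core_true_eq, List.append_assoc]

-- A's conditional edge slices applied to the collapsed string give exactly specT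
theorem slices_eq_specT (l : List Char) (hl : l ≠ []) :
    (let temp := core false l
     let t1 := if l.head? = some ' ' then temp.tail else temp
     if l.getLast? = some ' ' then t1.dropLast else t1) = specT l := by
  simp only [core_decomp l]
  by_cases ht : specT l = []
  · have hall := specT_nil_all_space l ht
    have hh : l.head? = some ' ' := by
      cases l with
      | nil => exact absurd rfl hl
      | cons c r => simpa using hall c (by simp)
    have hg : l.getLast? = some ' ' := getLast?_all_space l hl hall
    simp [hh, hg, ht, leadL, trailL]
  · by_cases hg : l.getLast? = some ' '
    · have htr : trailL l = [' '] := by simp [trailL, ht, tbL, hg]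
      by_cases hh : l.head? = some ' '
      · simp [hh, hg, htr, leadL]
      · simp [hh, hg, htr, leadL]
    · have htr : trailL l = [] := by simp [trailL, ht, tbL, hg]
      by_cases hh : l.head? = some ' '
      · simp [hh, hg, htr, leadL]
      · simp [hh, hg, htr, leadL]

-- ---------- B side: splitOn ' ' / filter / intercalate gives the same normal form ----------
-- structural model of PySem.Chars.splitOn.go with sep = [' ']
def sp : List Char → List Char → List (List Char)
  | cur, [] => [cur.reverse]
  | cur, c :: r => if c = ' ' then cur.reverse :: sp [] r else sp (c :: cur) r

theorem go_spec : ∀ (fuel : Nat) (l cur : List Char) (acc : List (List Char)), l.length < fuel →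
    PySem.Chars.splitOn.go [' '] fuel l cur acc = acc.reverse ++ sp cur l := by
  intro fuel
  induction fuel with
  | zero => intro l cur acc h; omega
  | succ f ih =>
    intro l cur acc h
    cases l with
    | nil => rw [PySem.Chars.splitOn.go.eq_def]; simp [sp]
    | cons c r =>
      rw [PySem.Chars.splitOn.go.eq_def]
      by_cases hc : c = ' '
      · subst hc
        have hpre : ([' '] : List Char).isPrefixOf (' ' :: r) = true := by simp
        simp only [hpre, if_true]
        have hdrop : List.drop ([' '] : List Char).length (' ' :: r) = r := by simp
        rw [hdrop, ih r [] (cur.reverse :: acc) (by simp at h; omega)]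
        simp [sp]
      · have hpre : ([' '] : List Char).isPrefixOf (c :: r) = false := by
          simp [List.isPrefixOf]
          exact fun h => hc h.symm
        simp only [hpre, Bool.false_eq_true, if_false]
        rw [ih r (c :: cur) acc (by simp at h; omega)]
        simp [sp, hc]

theorem splitOn_eq_sp (l : List Char) : PySem.Chars.splitOn l [' '] = sp [] l := by
  have := go_spec (l.length + 1) l [] [] (by omega)
  simpa [PySem.Chars.splitOn] using this

theorem intercalate_cons (sep a : List Char) (t : List (List Char)) :
    List.intercalate sep (a :: t) = a ++ (if t = [] then [] else sep ++ List.intercalate sep t) := by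
  cases t with
  | nil => simp [List.intercalate]
  | cons b u => simp [List.intercalate, List.intersperse]

theorem filter_members_ne_nil {F : List (List Char)} {X : List (List Char)}
    (hF : F = X.filter (fun t => !(t == []))) {a : List Char} {t : List (List Char)}
    (h : F = a :: t) : a ≠ [] := by
  have : a ∈ X.filter (fun t => !(t == [])) := by rw [← hF, h]; exact List.mem_cons_self
  have := (List.mem_filter.mp this).2
  simpa using this

-- joint induction: tokenize/filter/join equals the normal form
theorem sp_join (l : List Char) :
    (List.intercalate [' '] ((sp [] l).filter (fun t => !(t == []))) = specT l) ∧
    (∀ cur : List Char, cur ≠ [] →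
      List.intercalate [' '] ((sp cur l).filter (fun t => !(t == []))) = cur.reverse ++ specI l) := by
  induction l with
  | nil =>
    constructor
    · simp [sp, specT, List.intercalate]
    · intro cur hcur
      have he : cur.isEmpty = false := by simp [hcur]
      simp [sp, specI, List.intercalate, he]
  | cons c r ih =>
    have key : ∀ cur : List Char, cur ≠ [] →
        List.intercalate [' '] ((sp cur (c :: r)).filter (fun t => !(t == []))) =
          cur.reverse ++ specI (c :: r) := by
      intro cur hcur
      by_cases hc : c = ' '
      · subst hc
        have hcr : cur.reverse ≠ [] := by simpa using hcur
        rw [show sp cur (' ' :: r) = cur.reverse :: sp [] r from by simp [sp]]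
        rw [List.filter_cons, if_pos (by simpa using hcr)]
        rw [intercalate_cons]
        rw [specI, if_pos rfl]
        by_cases hF : (sp [] r).filter (fun t => !(t == [])) = []
        · have hs : specT r = [] := by rw [← ih.1, hF]; simp [List.intercalate]
          rw [if_pos hF, if_pos hs]
        · obtain ⟨a, t, hat⟩ := List.exists_cons_of_ne_nil hF
          have hane : a ≠ [] := filter_members_ne_nil rfl hat
          have hs : specT r ≠ [] := by
            rw [← ih.1, hat, intercalate_cons]
            intro hcon
            exact hane (List.append_eq_nil_iff.mp hcon).1
          rw [if_neg hF, if_neg hs, ih.1]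
          simp
      · rw [show sp cur (c :: r) = sp (c :: cur) r from by simp [sp, hc]]
        rw [ih.2 (c :: cur) (by simp), specI, if_neg hc]
        simp
    refine ⟨?_, key⟩
    by_cases hc : c = ' '
    · subst hc
      rw [show sp [] (' ' :: r) = [] :: sp [] r from by simp [sp]]
      rw [List.filter_cons, if_neg (by simp)]
      rw [ih.1, specT, if_pos rfl]
    · rw [show sp [] (c :: r) = sp [c] r from by simp [sp, hc]]
      rw [ih.2 [c] (by simp)]
      rw [specT, if_neg hc]
      simp

theorem toList_ne_nil (s : String) (h : s ≠ "") : s.toList ≠ [] := by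
  intro h0
  apply h
  have := congrArg String.ofList h0
  simpa using this

-- ===== VERDICT (by name: the statement is the Claim_ definition above) =====
theorem extra_space_remover_spec : Claim_equal_extra_space_remover := by
  intro s _ hpre
  have hl : s.toList ≠ [] := toList_ne_nil s hpre
  unfold Spec_extra_space_remover extra_space_remover extra_space_remover_alt
  simp only [PySem.Chars.join]
  rw [splitOn_eq_sp, (sp_join s.toList).1]
  have hslices := slices_eq_specT s.toList hl
  simp only [aLoop_eq, List.nil_append,
    PySem.List.slice_from_one, PySem.List.slice_to_neg_one, PySem.List.pyGet?_neg_one]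
  have h0 : PySem.List.pyGet? s.toList 0 = s.toList.head? := by
    rw [show (0 : Int) = ((0 : Nat) : Int) from rfl, PySem.List.pyGet?_natCast]
    cases (s.toList) <;> simp
  rw [h0]
  simp only at hslices
  rw [hslices]

@[simp] theorem extra_space_remover_raises : Claim_raises_extra_space_remover := by
  unfold Claim_raises_extra_space_remover
  exact ⟨fun s _ hr hp => hp hr, by decide⟩
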